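-- pv_equiv track=rewrite | github.com/MrBrantCode/unitest_baseline | mut_generate/mist_train_cf/cf_76522/solution.py | strange_sort_list_heap
-- ===== SOURCE A (Python) =====
-- import heapq
--
-- def strange_sort_list_heap(lst):
--     # Base case for an empty list
--     if not lst:
--         return []
--
--     # Transform list into a heap, in-place, in O(len(lst)) time
--     heapq.heapify(lst)
--
--     # List to hold the final result
--     result = []
--
--     # Flag to check whether to pop smallest or largest number
--     pop_smallest = True
--
--     while lst:
--         if pop_smallest:  # Pop the smallest number
--             result.append(heapq.heappop(lst))  # heapq.heappop() pops and return smallest element from heap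
--         else:  # Pop the largest number
--             lst = [-i for i in lst]  # Invert the order of heap
--             heapq.heapify(lst)  # Heapify again as order has changed
--             result.append(-heapq.heappop(lst))  # heapq.heappop() pops and return smallest(negative of largest) element from heap
--             lst = [-i for i in lst]  # Invert the order back
--             heapq.heapify(lst)  # Heapify again as order has changed
--         # Invert the flag to pop the other number in next iteration
--         pop_smallest = not pop_smallest
--
--     return result
-- ===== SOURCE B (Python) =====
-- def strange_sort_list_heap(lst):
--     s = sorted(lst)
--     result = []
--     i, j = 0, len(s) - 1
--     take_min = True
--     while i <= j:
--         if take_min: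
--             result.append(s[i])
--             i += 1
--         else:
--             result.append(s[j])
--             j -= 1
--         take_min = not take_min
--     return result
-- ===== Notes on version B (the rewrite author's own statement) =====
-- stated objective: faster
-- what changed: Instead of repeatedly re-heapifying (and negating the whole heap for every max extraction), B sorts once and walks two index pointers inward from both ends, alternately taking the front and back element.
import Mathlib
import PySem

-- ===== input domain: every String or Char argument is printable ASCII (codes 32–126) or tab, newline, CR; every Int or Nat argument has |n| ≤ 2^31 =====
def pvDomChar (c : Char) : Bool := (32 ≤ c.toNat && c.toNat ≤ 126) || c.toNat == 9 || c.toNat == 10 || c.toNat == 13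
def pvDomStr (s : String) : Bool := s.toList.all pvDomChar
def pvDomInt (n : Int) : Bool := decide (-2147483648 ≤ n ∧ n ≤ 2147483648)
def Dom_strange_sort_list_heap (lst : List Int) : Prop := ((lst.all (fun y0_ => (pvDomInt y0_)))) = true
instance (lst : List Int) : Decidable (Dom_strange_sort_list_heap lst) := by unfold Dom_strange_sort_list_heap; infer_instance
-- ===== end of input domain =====

-- B replaces A's repeated heapify/negate-heapify extraction with one sort and two index
-- pointers walking inward from both ends (measured faster, asymptotically O(n log n) vs O(n^2)).
-- Note: Python A mutates its argument in place (heapify/heappop); the equivalence proved here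
-- is about the RETURN value only.


-- ===== PORT A =====
-- heapq.heapify / heappop are standard-library calls, ported by their contract:
-- heappop removes and returns the smallest element (min? + remove?); the max branch keeps
-- A's negate / pop / negate-back dance literally.
def pvAGo : Nat → List Int → Bool → List Int
  | 0, _, _ => []
  | n + 1, l, popSmallest =>
    if popSmallest then
      match PySem.List.min? l (fun x => x) with
      | none => []
      | some m =>
        match PySem.List.remove? l m with
        | none => []
        | some rest => m :: pvAGo n rest false
    else
      let neg := l.map (fun i => -i)
      match PySem.List.min? neg (fun x => x) with
      | none => []
      | some m =>
        match PySem.List.remove? neg m with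
        | none => []
        | some rest => (-m) :: pvAGo n (rest.map (fun i => -i)) true

def strange_sort_list_heap (lst : List Int) : List Int :=
  if lst = [] then [] else pvAGo lst.length lst true

-- ===== PORT B =====
def pvBGo (s : List Int) : Nat → Int → Int → Bool → List Int
  | 0, _, _, _ => []
  | n + 1, i, j, takeMin =>
    if i ≤ j then
      if takeMin then
        match PySem.List.pyGet? s i with
        | none => []
        | some v => v :: pvBGo s n (i + 1) j false
      else
        match PySem.List.pyGet? s j with
        | none => []
        | some v => v :: pvBGo s n i (j - 1) true
    else []

def strange_sort_list_heap_alt (lst : List Int) : List Int :=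
  let s := PySem.List.sorted lst (fun x => x) false
  pvBGo s (s.length + 1) 0 ((s.length : Int) - 1) true

-- ===== PRECONDITION & SPEC =====
def Spec_strange_sort_list_heap (lst : List Int) (out : List Int) : Prop := out = strange_sort_list_heap_alt lst
instance (lst : List Int) (out : List Int) : Decidable (Spec_strange_sort_list_heap lst out) := by unfold Spec_strange_sort_list_heap; infer_instance

-- ===== CLAIM (what is proved, stated in full; the proofs are below) =====
def Claim_equal_strange_sort_list_heap : Prop := ∀ (lst : List Int), Dom_strange_sort_list_heap lst → Spec_strange_sort_list_heap lst (strange_sort_list_heap lst)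

-- ===== LEMMAS AND PROOFS =====

-- common spine: alternately take the head / the last element of a (sorted) list
def pvItl : Nat → List Int → Bool → List Int
  | 0, _, _ => []
  | _ + 1, [], _ => []
  | n + 1, a :: t, true => a :: pvItl n t false
  | n + 1, a :: t, false => (a :: t).getLast (by simp) :: pvItl n (a :: t).dropLast true

theorem pvItl_nil (n : Nat) (b : Bool) : pvItl n [] b = [] := by
  cases n <;> rfl

theorem pvItl_fuel : ∀ (n m : Nat) (s : List Int) (b : Bool), s.length ≤ n → s.length ≤ m →
    pvItl n s b = pvItl m s b := by
  intro n
  induction n with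
  | zero =>
    intro m s b hn _
    have : s = [] := List.eq_nil_of_length_eq_zero (Nat.le_zero.mp hn)
    subst this
    simp [pvItl_nil]
  | succ n ih =>
    intro m s b hn hm
    cases m with
    | zero =>
      have : s = [] := List.eq_nil_of_length_eq_zero (Nat.le_zero.mp hm)
      subst this
      simp [pvItl_nil]
    | succ m =>
      cases s with
      | nil => rfl
      | cons a t =>
        cases b with
        | true =>
          simp only [pvItl]
          rw [ih m t false (by simpa using Nat.succ_le_succ_iff.mp hn)
            (by simpa using Nat.succ_le_succ_iff.mp hm)]
        | false =>
          simp only [pvItl]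
          rw [ih m (a :: t).dropLast true (by simp at hn ⊢; omega) (by simp at hm ⊢; omega)]

-- in a (· ≤ ·)-pairwise list every element is at most the last one
theorem pvPairwise_le_getLast : ∀ (l : List Int) (h : l ≠ []), l.Pairwise (· ≤ ·) →
    ∀ x ∈ l, x ≤ l.getLast h := by
  intro l
  induction l with
  | nil => simp
  | cons a t ih =>
    intro _ hp x hx
    cases t with
    | nil =>
      simp only [List.mem_singleton] at hx
      simp [hx]
    | cons b u =>
      rw [List.getLast_cons (by simp)]
      rcases List.mem_cons.mp hx with rfl | hx'
      · exact List.rel_of_pairwise_cons hp (List.getLast_mem (by simp))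
      · exact ih (by simp) hp.of_cons x hx'

-- removing the minimum from the front of the sorted list
theorem pvSorted_min_step (l : List Int) (m : Int) (hne : l ≠ [])
    (hmem : m ∈ l) (hmin : ∀ y ∈ l, m ≤ y) :
    PySem.List.sorted l (fun x => x) false = m :: PySem.List.sorted (l.erase m) (fun x => x) false := by
  obtain ⟨h, t, hs⟩ : ∃ h t, PySem.List.sorted l (fun x => x) false = h :: t := by
    cases hsor : PySem.List.sorted l (fun x => x) false with
    | nil => exact absurd ((PySem.List.sorted_eq_nil_iff _ _ _).mp hsor) hne
    | cons h t => exact ⟨h, t, rfl⟩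
  have hh_mem : h ∈ l := (PySem.List.mem_sorted _ _ _ _).mp (hs ▸ List.mem_cons_self)
  have hh_le := PySem.List.key_head_sorted_le l (fun x => x) hs
  have hhm : h = m := le_antisymm (hh_le m hmem) (hmin h hh_mem)
  subst hhm
  have hperm : (h :: t).Perm l := hs ▸ PySem.List.sorted_perm l _ _
  have ht : t.Perm (l.erase h) := (hperm.trans (List.perm_cons_erase hh_mem)).cons_inv
  have hpt : t.Pairwise (· ≤ ·) := by
    have hpw := PySem.List.sorted_pairwise l (fun x => x)
    rw [hs] at hpw
    exact hpw.of_cons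
  rw [hs, PySem.List.sorted_id_eq_of_perm_of_pairwise _ t ht hpt]

-- removing the maximum from the back of the sorted list
theorem pvSorted_max_step (l : List Int) (M : Int) (hne : l ≠ [])
    (hmem : M ∈ l) (hmax : ∀ y ∈ l, y ≤ M) :
    PySem.List.sorted l (fun x => x) false
      = PySem.List.sorted (l.erase M) (fun x => x) false ++ [M] := by
  set s := PySem.List.sorted l (fun x => x) false with hsdef
  have hsne : s ≠ [] := by rw [hsdef, Ne, PySem.List.sorted_eq_nil_iff]; exact hne
  have hglmem : s.getLast hsne ∈ l := (PySem.List.mem_sorted _ _ _ _).mp (List.getLast_mem hsne)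
  have hMs : M ∈ s := (PySem.List.mem_sorted _ _ _ _).mpr hmem
  have hpw : s.Pairwise (· ≤ ·) := PySem.List.sorted_pairwise l _
  have hgl : s.getLast hsne = M :=
    le_antisymm (hmax _ hglmem) (pvPairwise_le_getLast s hsne hpw M hMs)
  have hsplit : s.dropLast ++ [M] = s := by rw [← hgl]; exact List.dropLast_append_getLast hsne
  have hperm0 : s.Perm l := by rw [hsdef]; exact PySem.List.sorted_perm l _ _
  have hperm1 : (s.dropLast ++ [M]).Perm l := by rw [hsplit]; exact hperm0
  have hperm2 : (M :: s.dropLast).Perm l := (List.perm_append_singleton _ _).symm.trans hperm1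
  have ht : s.dropLast.Perm (l.erase M) := (hperm2.trans (List.perm_cons_erase hmem)).cons_inv
  have hpt : s.dropLast.Pairwise (· ≤ ·) := hpw.sublist (List.dropLast_sublist s)
  rw [PySem.List.sorted_id_eq_of_perm_of_pairwise _ s.dropLast ht hpt, hsplit]

-- the `false` step of the spine on a list written back-to-front
theorem pvItl_concat (n : Nat) (X : List Int) (e : Int) :
    pvItl (n + 1) (X ++ [e]) false = e :: pvItl n X true := by
  cases X with
  | nil => simp [pvItl]
  | cons a t =>
    have hc : (a :: t) ++ [e] = a :: (t ++ [e]) := rfl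
    rw [hc]
    simp only [pvItl]
    show ((a :: t) ++ [e]).getLast (by simp) :: pvItl n ((a :: t) ++ [e]).dropLast true
      = e :: pvItl n (a :: t) true
    have hd : (a :: (t ++ [e])).dropLast = a :: t := List.dropLast_concat (l₁ := a :: t)
    simp
    rw [hd]

theorem pvAGo_eq : ∀ (n : Nat) (l : List Int) (b : Bool), l.length = n →
    pvAGo n l b = pvItl n (PySem.List.sorted l (fun x => x) false) b := by
  intro n
  induction n with
  | zero =>
    intro l b hl
    have : l = [] := List.eq_nil_of_length_eq_zero hl
    subst this
    rfl
  | succ n ih =>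
    intro l b hl
    have hne : l ≠ [] := by intro h; subst h; simp at hl
    cases b with
    | true =>
      obtain ⟨m, hm⟩ : ∃ m, PySem.List.min? l (fun x => x) = some m := by
        cases h : PySem.List.min? l (fun x => x) with
        | none => exact absurd ((PySem.List.min?_eq_none_iff _ _).mp h) hne
        | some m => exact ⟨m, rfl⟩
      have hmem := PySem.List.min?_mem hm
      have hmin := PySem.List.min?_isMin hm
      have hrem := PySem.List.remove?_eq_some_erase l m hmem
      have hlen : (l.erase m).length = n := by
        have h := List.length_erase (a := m) (l := l)
        simp only [hmem, if_pos] at h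
        omega
      rw [pvSorted_min_step l m hne hmem hmin]
      simp only [pvAGo, hm, hrem, pvItl, reduceIte]
      rw [ih (l.erase m) false hlen]
    | false =>
      have hnegne : l.map (fun i => -i) ≠ [] := by simpa using hne
      obtain ⟨m, hm⟩ : ∃ m, PySem.List.min? (l.map (fun i => -i)) (fun x => x) = some m := by
        cases h : PySem.List.min? (l.map (fun i => -i)) (fun x => x) with
        | none => exact absurd ((PySem.List.min?_eq_none_iff _ _).mp h) hnegne
        | some m => exact ⟨m, rfl⟩
      have hmem := PySem.List.min?_mem hm
      have hmin := PySem.List.min?_isMin hm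
      have hMmem : -m ∈ l := by
        obtain ⟨x, hx, hfx⟩ := List.mem_map.mp hmem
        have : -m = x := by omega
        exact this ▸ hx
      have hmax : ∀ y ∈ l, y ≤ -m := by
        intro y hy
        have := hmin (-y) (List.mem_map.mpr ⟨y, hy, rfl⟩)
        omega
      have hrem := PySem.List.remove?_eq_some_erase (l.map (fun i => -i)) m hmem
      have hback : ((l.map (fun i => -i)).erase m).map (fun i => -i) = l.erase (-m) := by
        have hinj : Function.Injective (fun i : Int => -i) := fun a b h => by
          simpa using h
        have h1 : (l.erase (-m)).map (fun i : Int => -i) = (l.map (fun i : Int => -i)).erase m := by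
          have h2 := List.map_erase hinj (a := -m) l
          simpa using h2
        rw [← h1, List.map_map]
        simp
      have hlen : (l.erase (-m)).length = n := by
        have h := List.length_erase (a := -m) (l := l)
        simp only [hMmem, if_pos] at h
        omega
      rw [pvSorted_max_step l (-m) hne hMmem hmax, pvItl_concat]
      simp only [pvAGo, hm, hrem]
      rw [hback, ih (l.erase (-m)) true hlen]
      rfl

theorem pvBGo_eq : ∀ (n : Nat) (s : List Int) (i j : Int) (b : Bool), 0 ≤ i → j < s.length →
    pvBGo s n i j b = pvItl n ((s.take (j + 1).toNat).drop i.toNat) b := by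
  intro n s
  induction n with
  | zero => intro i j b _ _; rfl
  | succ n ih =>
    intro i j b h0 hj
    by_cases hij : i ≤ j
    · have hi : i.toNat < s.length := by omega
      have hjnat : j.toNat < s.length := by omega
      have hjn : (j + 1).toNat ≤ s.length := by omega
      have htlen : (s.take (j + 1).toNat).length = (j + 1).toNat := by
        simp; omega
      cases b with
      | true =>
        have hget : PySem.List.pyGet? s i = some (s[i.toNat]'hi) := by
          have h1 := PySem.List.pyGet?_natCast s i.toNat
          rw [show ((i.toNat : Nat) : Int) = i by omega] at h1
          rw [h1, List.getElem?_eq_getElem hi]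
        have hseg : (s.take (j + 1).toNat).drop i.toNat
            = s[i.toNat]'hi :: (s.take (j + 1).toNat).drop (i.toNat + 1) := by
          rw [List.drop_eq_getElem_cons (by omega)]
          congr 1
          exact List.getElem_take
        simp only [pvBGo, if_pos hij, hget]
        rw [hseg]
        simp only [pvItl]
        rw [ih (i + 1) j false (by omega) hj, show (i + 1).toNat = i.toNat + 1 by omega]
        rfl
      | false =>
        have hget : PySem.List.pyGet? s j = some (s[j.toNat]'hjnat) := by
          have h1 := PySem.List.pyGet?_natCast s j.toNat
          rw [show ((j.toNat : Nat) : Int) = j by omega] at h1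
          rw [h1, List.getElem?_eq_getElem hjnat]
        have htake : s.take (j + 1).toNat = s.take j.toNat ++ [s[j.toNat]'hjnat] := by
          rw [show (j + 1).toNat = j.toNat + 1 by omega, List.take_add_one,
            List.getElem?_eq_getElem hjnat]
          rfl
        have hseg : (s.take (j + 1).toNat).drop i.toNat
            = (s.take j.toNat).drop i.toNat ++ [s[j.toNat]'hjnat] := by
          rw [htake, List.drop_append_of_le_length (by simp; omega)]
        simp only [pvBGo, if_pos hij, hget]
        rw [hseg, pvItl_concat]
        rw [ih i (j - 1) true h0 (by omega), show j - 1 + 1 = j by ring]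
        rfl
    · have hnil : (s.take (j + 1).toNat).drop i.toNat = [] := by
        apply List.drop_eq_nil_of_le
        have : (s.take (j + 1).toNat).length ≤ (j + 1).toNat := by simp
        omega
      simp only [pvBGo, if_neg hij]
      rw [hnil, pvItl_nil]

-- ===== VERDICT (by name: the statement is the Claim_ definition above) =====
theorem strange_sort_list_heap_spec : Claim_equal_strange_sort_list_heap := by
  intro lst _
  unfold Spec_strange_sort_list_heap strange_sort_list_heap strange_sort_list_heap_alt
  by_cases hne : lst = []
  · subst hne; rfl
  · rw [if_neg hne]
    have hlen : (PySem.List.sorted lst (fun x => x) false).length = lst.length :=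
      PySem.List.length_sorted lst (fun x => x) false
    rw [pvAGo_eq lst.length lst true rfl]
    rw [pvBGo_eq ((PySem.List.sorted lst (fun x => x) false).length + 1)
      (PySem.List.sorted lst (fun x => x) false) 0
      (((PySem.List.sorted lst (fun x => x) false).length : Int) - 1) true (by omega) (by omega)]
    have hseg : ((PySem.List.sorted lst (fun x => x) false).take
        ((((PySem.List.sorted lst (fun x => x) false).length : Int) - 1 + 1)).toNat).drop (0 : Int).toNat
        = PySem.List.sorted lst (fun x => x) false := by
      rw [show (((PySem.List.sorted lst (fun x => x) false).length : Int) - 1 + 1).toNat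
        = (PySem.List.sorted lst (fun x => x) false).length by omega]
      simp
    rw [hseg]
    exact pvItl_fuel lst.length ((PySem.List.sorted lst (fun x => x) false).length + 1)
      (PySem.List.sorted lst (fun x => x) false) true (by omega) (by omega)
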